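-- pv_equiv track=rewrite | github.com/while-basic/ai-know-it-all | src/obsidian.py | extract_conversation_from_note
-- ===== SOURCE A (Python) =====
-- from typing import Dict, List, Any, Optional, Set
--
-- def extract_conversation_from_note(note_content: str) -> List[Dict[str, str]]:
--     """
--     Extract conversation messages from a note.
--
--     Args:
--         note_content: Content of the note
--
--     Returns:
--         List of messages with role and content
--     """
--     if not note_content:
--         return []
--
--     lines = note_content.split('\n')
--     messages = []
--
--     current_role = None
--     current_content = []
--
--     for line in lines:
--         if line.startswith('### User'):
--             # Save previous message if exists
--             if current_role and current_content:
--                 messages.append({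
--                     'role': current_role,
--                     'content': '\n'.join(current_content).strip()
--                 })
--                 current_content = []
--
--             current_role = 'user'
--         elif line.startswith('### AI'):
--             # Save previous message if exists
--             if current_role and current_content:
--                 messages.append({
--                     'role': current_role,
--                     'content': '\n'.join(current_content).strip()
--                 })
--                 current_content = []
--
--             current_role = 'assistant'
--         elif line.startswith('### System'):
--             # Save previous message if exists
--             if current_role and current_content:
--                 messages.append({
--                     'role': current_role,
--                     'content': '\n'.join(current_content).strip()
--                 })
--                 current_content = []
--
--             current_role = 'system'
--         elif current_role:
--             current_content.append(line)
--
--     # Save the last message if exists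
--     if current_role and current_content:
--         messages.append({
--             'role': current_role,
--             'content': '\n'.join(current_content).strip()
--         })
--
--     return messages
-- ===== SOURCE B (Python) =====
-- def _role_of(line):
--     for marker, role in (('### User', 'user'), ('### AI', 'assistant'), ('### System', 'system')):
--         if line.startswith(marker):
--             return role
--     return None
--
--
-- def extract_conversation_from_note(note_content):
--     lines = note_content.split('\n')
--     # skip the prologue before the first header line
--     while lines and _role_of(lines[0]) is None:
--         lines = lines[1:]
--     messages = []
--     # chunk at a time: header line, then its body = the run of non-header lines
--     while lines:
--         role = _role_of(lines[0])
--         rest = lines[1:]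
--         body = []
--         while rest and _role_of(rest[0]) is None:
--             body.append(rest[0])
--             rest = rest[1:]
--         if body:
--             messages.append({'role': role, 'content': '\n'.join(body).strip()})
--         lines = rest
--     return messages
-- ===== Notes on version B (the rewrite author's own statement) =====
-- stated objective: simpler
-- what changed: Replaces A's cross-line state machine (current_role/current_content carried through one fold with a trailing flush) by a chunk-at-a-time scan: drop the prologue, then repeatedly take a header line and the span of non-header lines after it, emitting each message locally with no carried state.
import Mathlib
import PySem

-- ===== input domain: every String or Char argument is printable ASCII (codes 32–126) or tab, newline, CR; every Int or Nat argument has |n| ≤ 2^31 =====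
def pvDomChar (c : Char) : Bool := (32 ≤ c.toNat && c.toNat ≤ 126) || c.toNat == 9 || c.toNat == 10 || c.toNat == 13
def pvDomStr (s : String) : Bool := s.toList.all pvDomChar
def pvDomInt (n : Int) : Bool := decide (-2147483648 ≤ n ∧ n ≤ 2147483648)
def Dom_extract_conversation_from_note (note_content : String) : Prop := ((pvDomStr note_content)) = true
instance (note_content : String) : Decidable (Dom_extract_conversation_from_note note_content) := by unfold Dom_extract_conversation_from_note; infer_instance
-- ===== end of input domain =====

-- B replaces A's cross-line role/content state machine by a stateless chunk-at-a-time
-- (header + span of body lines) scan; objective: simpler.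

-- a message dict {'role': r, 'content': '\n'.join(content).strip()} (shared data constructor)
def mkMsg (r : String) (content : List String) : List (String × String) :=
  [("role", r), ("content", PySem.Str.strip (PySem.Str.join "\n" content))]

-- ===== PORT A =====
-- one iteration of A's for-loop over (current_role, current_content, messages)
def aStep (st : Option String × List String × List (List (String × String))) (line : String) :
    Option String × List String × List (List (String × String)) :=
  let (role, content, msgs) := st
  if PySem.Str.startswith line "### User" then
    if role.isSome && !content.isEmpty then (some "user", [], msgs ++ [mkMsg (role.getD "") content])
    else (some "user", content, msgs)
  else if PySem.Str.startswith line "### AI" then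
    if role.isSome && !content.isEmpty then (some "assistant", [], msgs ++ [mkMsg (role.getD "") content])
    else (some "assistant", content, msgs)
  else if PySem.Str.startswith line "### System" then
    if role.isSome && !content.isEmpty then (some "system", [], msgs ++ [mkMsg (role.getD "") content])
    else (some "system", content, msgs)
  else if role.isSome then (role, content ++ [line], msgs)
  else (role, content, msgs)

-- A's trailing "save the last message if exists"
def aFinal (st : Option String × List String × List (List (String × String))) :
    List (List (String × String)) :=
  let (role, content, msgs) := st
  if role.isSome && !content.isEmpty then msgs ++ [mkMsg (role.getD "") content] else msgs

def extract_conversation_from_note (note_content : String) : List (List (String × String)) :=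
  if note_content = "" then []
  else aFinal (((PySem.Str.split? note_content "\n").getD []).foldl aStep (none, [], []))

-- ===== PORT B =====
-- Source B's _role_of
def roleOf (line : String) : Option String :=
  if PySem.Str.startswith line "### User" then some "user"
  else if PySem.Str.startswith line "### AI" then some "assistant"
  else if PySem.Str.startswith line "### System" then some "system"
  else none

-- Source B's outer while loop: lines starts with a header (or is empty); body = inner while's span
def bLoop (lines : List String) : List (List (String × String)) :=
  match lines with
  | [] => []
  | line :: rest =>
    let body := rest.takeWhile (fun l => (roleOf l).isNone)
    let rest' := rest.dropWhile (fun l => (roleOf l).isNone)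
    (if body ≠ [] then [mkMsg ((roleOf line).getD "") body] else []) ++ bLoop rest'
termination_by lines.length
decreasing_by
  simp only [List.length_cons]
  exact Nat.lt_succ_of_le (List.length_dropWhile_le _ _)

def extract_conversation_from_note_alt (note_content : String) : List (List (String × String)) :=
  bLoop (((PySem.Str.split? note_content "\n").getD []).dropWhile (fun l => (roleOf l).isNone))

-- ===== PRECONDITION & SPEC =====
def Spec_extract_conversation_from_note (note_content : String) (out : List (List (String × String))) : Prop := out = extract_conversation_from_note_alt note_content
instance (note_content : String) (out : List (List (String × String))) : Decidable (Spec_extract_conversation_from_note note_content out) := by unfold Spec_extract_conversation_from_note; infer_instance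

-- ===== CLAIM (what is proved, stated in full; the proofs are below) =====
def Claim_equal_extract_conversation_from_note : Prop := ∀ (note_content : String), Dom_extract_conversation_from_note note_content → Spec_extract_conversation_from_note note_content (extract_conversation_from_note note_content)

-- ===== LEMMAS AND PROOFS =====

-- aStep characterised through roleOf
theorem aStep_header {line : String} {r : String} (h : roleOf line = some r)
    (role : Option String) (content : List String) (msgs : List (List (String × String))) :
    aStep (role, content, msgs) line =
      if role.isSome && !content.isEmpty then (some r, [], msgs ++ [mkMsg (role.getD "") content])
      else (some r, content, msgs) := by
  unfold roleOf at h
  unfold aStep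
  split_ifs at h ⊢ <;> simp_all

theorem aStep_body {line : String} (h : roleOf line = none)
    (role : Option String) (content : List String) (msgs : List (List (String × String))) :
    aStep (role, content, msgs) line =
      if role.isSome then (role, content ++ [line], msgs) else (role, content, msgs) := by
  unfold roleOf at h
  unfold aStep
  split_ifs at h ⊢ <;> simp_all

-- takeWhile over a run of satisfying elements followed by a failing head
theorem tw_app {α : Type} (p : α → Bool) (xs : List α) (y : α) (ys : List α)
    (h : ∀ l ∈ xs, p l = true) (hy : p y = false) :
    (xs ++ y :: ys).takeWhile p = xs := by
  induction xs with
  | nil => simp [hy]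
  | cons a as ih =>
    have ha := h a List.mem_cons_self
    simp [ha, ih (fun l hl => h l (List.mem_cons_of_mem _ hl))]

-- the fold over a run of body lines just appends them to content
theorem foldl_body (lines : List String) (h : ∀ l ∈ lines, (roleOf l).isNone)
    (r : String) (content : List String) (msgs : List (List (String × String))) :
    lines.foldl aStep (some r, content, msgs) = (some r, content ++ lines, msgs) := by
  induction lines generalizing content with
  | nil => simp
  | cons x xs ih =>
    have hx : roleOf x = none := by
      simpa using h x (List.mem_cons_self)
    rw [List.foldl_cons, aStep_body hx]
    simp only [Option.isSome_some, if_pos]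
    rw [ih (fun l hl => h l (List.mem_cons_of_mem _ hl))]
    simp

-- with no role yet, body lines are skipped without touching the state
theorem foldl_none (lines : List String) (h : ∀ l ∈ lines, (roleOf l).isNone)
    (msgs : List (List (String × String))) :
    lines.foldl aStep ((none : Option String), ([] : List String), msgs) = (none, [], msgs) := by
  induction lines with
  | nil => simp
  | cons x xs ih =>
    have hx : roleOf x = none := by simpa using h x (List.mem_cons_self)
    rw [List.foldl_cons, aStep_body hx]
    simp only [Option.isSome_none, if_neg Bool.false_ne_true]
    exact ih (fun l hl => h l (List.mem_cons_of_mem _ hl))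

-- main invariant: after a header with role r and accumulated content acc,
-- A's remaining fold + final flush equals B's chunk scan
theorem main_inv (lines : List String) (r : String) (acc : List String)
    (msgs : List (List (String × String))) :
    aFinal (lines.foldl aStep (some r, acc, msgs)) =
      msgs ++ (if acc ++ lines.takeWhile (fun l => (roleOf l).isNone) ≠ [] then
            [mkMsg r (acc ++ lines.takeWhile (fun l => (roleOf l).isNone))] else [])
        ++ bLoop (lines.dropWhile (fun l => (roleOf l).isNone)) := by
  cases hdw : lines.dropWhile (fun l => (roleOf l).isNone) with
  | nil =>
    have hall : ∀ l ∈ lines, (roleOf l).isNone := by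
      intro l hl
      have := (List.dropWhile_eq_nil_iff (p := fun l => (roleOf l).isNone)).mp hdw l hl
      simpa using this
    have htw : lines.takeWhile (fun l => (roleOf l).isNone) = lines :=
      List.takeWhile_eq_self_iff.mpr (by intro l hl; simpa using hall l hl)
    rw [foldl_body lines hall, htw, bLoop]
    unfold aFinal
    by_cases hne : acc ++ lines = []
    · simp [hne]
    · simp [hne]
  | cons hd tl =>
    have hhd : (roleOf hd).isSome = true := by
      have h := List.head_dropWhile_not (p := fun l => (roleOf l).isNone) (l := lines)
        (by simp [hdw])
      simpa [hdw] using h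
    obtain ⟨r', hr'⟩ := Option.isSome_iff_exists.mp hhd
    have hhdf : (fun l => (roleOf l).isNone) hd = false := by simp [hr']
    have hsplit : lines = lines.takeWhile (fun l => (roleOf l).isNone) ++ hd :: tl := by
      conv_lhs => rw [← List.takeWhile_append_dropWhile (p := fun l => (roleOf l).isNone) (l := lines)]
      rw [hdw]
    have htwmem : ∀ l ∈ lines.takeWhile (fun l => (roleOf l).isNone), (roleOf l).isNone := by
      intro l hl; simpa using List.mem_takeWhile_imp hl
    have hlen : tl.length < lines.length := by
      rw [hsplit]; simp; omega
    rw [hsplit, List.foldl_append, foldl_body _ htwmem, List.foldl_cons, aStep_header hr']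
    set body := lines.takeWhile (fun l => (roleOf l).isNone) with hbody
    have htwA : (body ++ hd :: tl).takeWhile (fun l => (roleOf l).isNone) = body :=
      tw_app _ body hd tl htwmem hhdf
    rw [htwA]
    by_cases hflush : acc ++ body = []
    · obtain ⟨hacc, hb⟩ := List.append_eq_nil_iff.mp hflush
      simp only [Option.isSome_some, Bool.true_and, hacc, hb, List.append_nil,
        List.isEmpty_nil, Bool.not_true, if_neg Bool.false_ne_true, Option.getD_some]
      rw [main_inv tl r' [] msgs, bLoop]
      simp [hr']
    · have hne : ¬ (acc ++ body).isEmpty = true := by simp [hflush]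
      simp only [Option.isSome_some, Bool.true_and, Option.getD_some]
      rw [if_pos (by simpa using hne), main_inv tl r' [] (msgs ++ [mkMsg r (acc ++ body)]),
        bLoop]
      simp [hflush, hr']
termination_by lines.length
decreasing_by all_goals exact hlen

-- ===== VERDICT (by name: the statement is the Claim_ definition above) =====
theorem extract_conversation_from_note_spec : Claim_equal_extract_conversation_from_note := by
  intro note_content _
  unfold Spec_extract_conversation_from_note extract_conversation_from_note
    extract_conversation_from_note_alt
  by_cases hempty : note_content = ""
  · subst hempty
    rw [if_pos rfl]
    have hd : (((PySem.Str.split? "" "\n").getD []).dropWhile (fun l => (roleOf l).isNone)) = [] := by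
      decide
    rw [hd, bLoop]
  · rw [if_neg hempty]
    set lines := (PySem.Str.split? note_content "\n").getD [] with hlines
    cases hdw : lines.dropWhile (fun l => (roleOf l).isNone) with
    | nil =>
      have hall : ∀ l ∈ lines, (roleOf l).isNone := by
        intro l hl
        have := (List.dropWhile_eq_nil_iff (p := fun l => (roleOf l).isNone)).mp hdw l hl
        simpa using this
      rw [foldl_none lines hall, bLoop]
      rfl
    | cons hd tl =>
      have hhd : (roleOf hd).isSome = true := by
        have h := List.head_dropWhile_not (p := fun l => (roleOf l).isNone) (l := lines)
          (by simp [hdw])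
        simpa [hdw] using h
      obtain ⟨r', hr'⟩ := Option.isSome_iff_exists.mp hhd
      have hsplit : lines = lines.takeWhile (fun l => (roleOf l).isNone) ++ hd :: tl := by
        conv_lhs => rw [← List.takeWhile_append_dropWhile (p := fun l => (roleOf l).isNone) (l := lines)]
        rw [hdw]
      have htwmem : ∀ l ∈ lines.takeWhile (fun l => (roleOf l).isNone), (roleOf l).isNone := by
        intro l hl; simpa using List.mem_takeWhile_imp hl
      conv_lhs => rw [hsplit]
      rw [List.foldl_append, foldl_none _ htwmem, List.foldl_cons, aStep_header hr']
      simp only [Option.isSome_none, Bool.false_and, if_neg Bool.false_ne_true]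
      rw [main_inv tl r' [] [], bLoop]
      simp [hr']
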